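-- pv_equiv track=rewrite | github.com/nguyenngochuy91/Ancestral-Blocks-Reconstruction | findParent_global2.py | reduce_gene
-- ===== SOURCE A (Python) =====
-- def reduce_gene(gene_block,genes):
--     result=[]
--     for block in gene_block: # iterate trhough each gene block in the genome
--         new_block =''
--         for gene in block: # iterate through each gene in the gene block
--             if gene in genes:
--                 new_block +=gene # add gene to the string
--         if len(new_block)>0:
--             result.append(''.join(sorted(new_block))) # add the sorted to the result
--     return result
-- ===== SOURCE B (Python) =====
-- def reduce_gene(gene_block, genes):
--     order = sorted(set(genes))
--     pieces = (''.join(a * block.count(a) for a in order) for block in gene_block)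
--     return [p for p in pieces if p]
-- ===== Notes on version B (the rewrite author's own statement) =====
-- stated objective: alternative
-- what changed: B precomputes the sorted distinct gene alphabet once and, per block, emits each alphabet char repeated block.count(a) times (a distribution/counting pass over the fixed alphabet via map+filter), instead of A's per-character membership loop that concatenates matches and comparison-sorts each block.
import Mathlib
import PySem

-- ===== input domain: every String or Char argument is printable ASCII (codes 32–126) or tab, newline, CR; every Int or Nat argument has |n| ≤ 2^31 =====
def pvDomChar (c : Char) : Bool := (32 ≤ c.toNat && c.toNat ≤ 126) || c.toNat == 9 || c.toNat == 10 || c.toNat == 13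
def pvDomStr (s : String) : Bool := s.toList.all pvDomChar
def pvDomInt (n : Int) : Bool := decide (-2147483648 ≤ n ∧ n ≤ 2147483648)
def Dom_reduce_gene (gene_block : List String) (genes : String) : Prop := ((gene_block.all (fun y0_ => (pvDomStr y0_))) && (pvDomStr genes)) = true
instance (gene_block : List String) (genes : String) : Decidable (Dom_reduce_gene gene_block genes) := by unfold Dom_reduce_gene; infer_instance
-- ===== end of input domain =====

-- B precomputes the sorted distinct gene alphabet once and emits each block by a counting/distribution
-- pass over that alphabet (map + filter), replacing A's per-character membership loop and per-block
-- comparison sort (alternative decomposition, not claimed faster).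

-- ===== PORT A =====
def reduce_gene (gene_block : List String) (genes : String) : List String :=
  gene_block.foldl (fun result block =>
    let new_block : List Char :=
      block.toList.foldl (fun nb gene =>
        if PySem.Chars.isIn [gene] genes.toList then nb ++ [gene] else nb) []
    if new_block.length > 0 then
      result ++ [String.ofList (PySem.List.sorted new_block (fun x => x) false)]
    else result) []

-- ===== PORT B =====
-- 'block.count(a)' for a single char a equals the char count of block's character list (exact).
def reduce_gene_alt (gene_block : List String) (genes : String) : List String :=
  let order := PySem.List.sorted (PySem.Set.ofList genes.toList) (fun x => x) false
  (gene_block.map (fun block =>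
      String.ofList (order.flatMap (fun a => List.replicate (block.toList.count a) a)))).filter
    (fun p => !p.toList.isEmpty)

-- ===== PRECONDITION & SPEC =====
def Spec_reduce_gene (gene_block : List String) (genes : String) (out : List String) : Prop := out = reduce_gene_alt gene_block genes
instance (gene_block : List String) (genes : String) (out : List String) : Decidable (Spec_reduce_gene gene_block genes out) := by unfold Spec_reduce_gene; infer_instance

-- ===== CLAIM (what is proved, stated in full; the proofs are below) =====
def Claim_equal_reduce_gene : Prop := ∀ (gene_block : List String) (genes : String), Dom_reduce_gene gene_block genes → Spec_reduce_gene gene_block genes (reduce_gene gene_block genes)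

-- ===== LEMMAS AND PROOFS =====

-- Distribution along a strictly increasing list of representatives is sorted (≤).
theorem pairwise_le_flatMap_replicate (n : Char → Nat) :
    ∀ (s : List Char), s.Pairwise (· < ·) →
      (s.flatMap fun g => List.replicate (n g) g).Pairwise (· ≤ ·) := by
  intro s
  induction s with
  | nil => intro _; simp
  | cons x xs ih =>
    intro hp
    rw [List.pairwise_cons] at hp
    rw [List.flatMap_cons, List.pairwise_append]
    refine ⟨List.pairwise_replicate.2 (Or.inr le_rfl), ih hp.2, ?_⟩
    intro a ha b hb
    rw [List.eq_of_mem_replicate ha]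
    rcases List.mem_flatMap.1 hb with ⟨g, hg, hbg⟩
    rw [List.eq_of_mem_replicate hbg]
    exact le_of_lt (hp.1 g hg)

-- Summed counts of the distributed replicates over a nodup representative list.
theorem sum_count_replicate (a : Char) (n : Char → Nat) :
    ∀ s : List Char, s.Nodup →
      (s.map fun g => List.count a (List.replicate (n g) g)).sum
        = if a ∈ s then n a else 0 := by
  intro s
  induction s with
  | nil => simp
  | cons x xs ih =>
    intro hnd
    rw [List.nodup_cons] at hnd
    rw [List.map_cons, List.sum_cons, ih hnd.2, List.count_replicate]
    by_cases hax : x = a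
    · subst hax
      simp [hnd.1]
    · have hax' : ¬ a = x := fun h => hax h.symm
      simp [hax, hax']

-- B's distributed block is a permutation of A's filtered block.
theorem flatMap_replicate_perm_filter (block genes : List Char) :
    ((PySem.List.sorted (PySem.Set.ofList genes) (fun x => x) false).flatMap
        (fun a => List.replicate (block.count a) a)).Perm
      (block.filter (fun c => PySem.Chars.isIn [c] genes)) := by
  set s := PySem.List.sorted (PySem.Set.ofList genes) (fun x => x) false with hs
  have hnd : s.Nodup :=
    (PySem.List.sorted_perm (xs := PySem.Set.ofList genes) (key := fun x => x)
      (rev := false)).nodup_iff.2 (PySem.Set.nodup_ofList genes)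
  have hmem : ∀ a : Char, a ∈ s ↔ a ∈ genes := by
    intro a
    rw [hs, PySem.List.mem_sorted, PySem.Set.mem_ofList]
  rw [List.perm_iff_count]
  intro a
  rw [List.count_flatMap]
  simp only [Function.comp_def]
  rw [sum_count_replicate a _ s hnd]
  by_cases ha : a ∈ genes
  · rw [if_pos ((hmem a).2 ha)]
    exact (List.count_filter (by simpa [List.singleton_infix_iff, PySem.Chars.isIn_iff_infix] using ha)).symm
  · rw [if_neg (fun h => ha ((hmem a).1 h))]
    refine (List.count_eq_zero.2 ?_).symm
    intro hmemf
    exact ha (by simpa [PySem.Chars.isIn_iff_infix, List.singleton_infix_iff] using (List.mem_filter.1 hmemf).2)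

-- The per-block core: A's comparison sort of the matched chars equals B's distributed alphabet pass.
theorem sorted_filter_eq_flatMap (block genes : List Char) :
    PySem.List.sorted (block.filter (fun c => PySem.Chars.isIn [c] genes)) (fun x => x) false
      = (PySem.List.sorted (PySem.Set.ofList genes) (fun x => x) false).flatMap
          (fun a => List.replicate (block.count a) a) := by
  apply PySem.List.sorted_id_eq_of_perm_of_pairwise
  · exact flatMap_replicate_perm_filter block genes
  · exact pairwise_le_flatMap_replicate _ _ (PySem.List.sorted_ofList_pairwise_lt genes)

-- Two folds with pointwise-equal step functions agree.
theorem foldl_ext_step {α β : Type} (f g : β → α → β) (l : List α)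
    (h : ∀ a b, f a b = g a b) : ∀ init : β, l.foldl f init = l.foldl g init := by
  induction l with
  | nil => intro init; rfl
  | cons x xs ih => intro init; simp only [List.foldl_cons, h, ih]

-- A's guarded fold over blocks is B's map-then-filter (generalizing the accumulator).
theorem foldl_if_eq_filter_map (h : String → String) (q : String → Bool)
    (hq : ∀ b, ((h b).toList.length > 0) ↔ q (h b) = true) :
    ∀ (l : List String) (acc : List String),
      l.foldl (fun r b => if (h b).toList.length > 0 then r ++ [h b] else r) acc
        = acc ++ (l.map h).filter q := by
  intro l
  induction l with
  | nil => intro acc; simp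
  | cons b bs ih =>
    intro acc
    by_cases hb : (h b).toList.length > 0
    · rw [List.foldl_cons, if_pos hb, ih, List.map_cons,
        List.filter_cons_of_pos ((hq b).1 hb)]
      simp
    · rw [List.foldl_cons, if_neg hb, ih, List.map_cons,
        List.filter_cons_of_neg (fun hc => hb ((hq b).2 hc))]

theorem reduce_gene_eq_alt (gene_block : List String) (genes : String) :
    reduce_gene gene_block genes = reduce_gene_alt gene_block genes := by
  unfold reduce_gene reduce_gene_alt
  have hA : ∀ block : String,
      block.toList.foldl (fun nb gene =>
        if PySem.Chars.isIn [gene] genes.toList then nb ++ [gene] else nb) []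
      = block.toList.filter (fun gene => PySem.Chars.isIn [gene] genes.toList) := by
    intro block
    rw [PySem.List.foldl_append_if_eq_filter]
    exact List.nil_append _
  set h : String → String := fun block =>
    String.ofList ((PySem.List.sorted (PySem.Set.ofList genes.toList) (fun x => x) false).flatMap
      (fun a => List.replicate (block.toList.count a) a)) with hh
  have hstep : ∀ (r : List String) (block : String),
      (let new_block : List Char :=
        block.toList.foldl (fun nb gene =>
          if PySem.Chars.isIn [gene] genes.toList then nb ++ [gene] else nb) []
       if new_block.length > 0 then
        r ++ [String.ofList (PySem.List.sorted new_block (fun x => x) false)]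
       else r)
      = (if (h block).toList.length > 0 then r ++ [h block] else r) := by
    intro r block
    simp only [hA, hh]
    rw [← sorted_filter_eq_flatMap block.toList genes.toList]
    rw [String.toList_ofList, PySem.List.length_sorted]
  calc gene_block.foldl (fun result block =>
        let new_block : List Char :=
          block.toList.foldl (fun nb gene =>
            if PySem.Chars.isIn [gene] genes.toList then nb ++ [gene] else nb) []
        if new_block.length > 0 then
          result ++ [String.ofList (PySem.List.sorted new_block (fun x => x) false)]
        else result) []
      = gene_block.foldl (fun r block => if (h block).toList.length > 0 then r ++ [h block] else r) [] := by
        exact foldl_ext_step _ _ gene_block (fun r block => hstep r block) []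
    _ = ([] : List String) ++ (gene_block.map h).filter (fun p => !p.toList.isEmpty) := by
        apply foldl_if_eq_filter_map
        intro b
        cases hl : (h b).toList with
        | nil => simp
        | cons c cs => simp
    _ = (gene_block.map h).filter (fun p => !p.toList.isEmpty) := List.nil_append _

-- ===== VERDICT (by name: the statement is the Claim_ definition above) =====
theorem reduce_gene_spec : Claim_equal_reduce_gene := by
  intro gb g _
  unfold Spec_reduce_gene
  exact reduce_gene_eq_alt gb g
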